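-- pv_equiv track=rewrite | github.com/portal-cornell/robotouille | environments/env_generator/builder.py | create_combinations
-- ===== SOURCE A (Python) =====
-- import itertools
--
-- def create_combinations(combination_dict):
--     """
--     Creates and returns the combinations of combination predicates along with their ID order.
--
--     This function takes in the combination dict, maintains the order of the IDs, takes permutations
--     of the IDs for the same argument type, then takes a combination of all the permutations to create
--     all possible combinations of combination predicates.
--
--     Args:
--         combination_dict (dict): Dictionary of all the specific entities of a particular type.
--
--     Returns:
--         combinations (list): List of all possible combinations of combination predicates.
--         id_order (list): List of the order of IDs for each combination.
--     """
--     combination_list = []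
--     id_order = []
--     for arg in combination_dict:
--         ids = list(combination_dict[arg]['ids'])
--         id_order += ids
--         entities = combination_dict[arg]['entities']
--         if entities == []:
--             id_counter = 1
--             for _ in ids:
--                 entities.append(arg + str(id_counter))
--                 id_counter += 1
--         permutations = list(itertools.permutations(entities, len(ids)))
--         combination_list.append(permutations)
--     product = itertools.product(*combination_list)
--     # Clean up product list
--     combinations = [list(itertools.chain.from_iterable(x)) for x in product]
--     return combinations, id_order
-- ===== SOURCE B (Python) =====
-- def _selections(pool):
--     """All ways to pick one element of pool in order: (picked, rest-in-order)."""
--     if not pool: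
--         return []
--     head, tail = pool[0], pool[1:]
--     return [(head, tail)] + [(y, [head] + rest) for (y, rest) in _selections(tail)]
--
--
-- def _permutations(pool, r):
--     """All length-r ordered selections of distinct positions of pool, itertools order."""
--     if r == 0:
--         return [[]]
--     return [[x] + perm for (x, rest) in _selections(pool) for perm in _permutations(rest, r - 1)]
--
--
-- def create_combinations(combination_dict):
--     combinations = [[]]
--     id_order = []
--     for arg in combination_dict:
--         ids = list(combination_dict[arg]['ids'])
--         id_order += ids
--         entities = combination_dict[arg]['entities']
--         if entities == []:
--             entities.extend(arg + str(i + 1) for i in range(len(ids)))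
--         perms = _permutations(list(entities), len(ids))
--         combinations = [prev + perm for prev in combinations for perm in perms]
--     return combinations, id_order
-- ===== Notes on version B (the rewrite author's own statement) =====
-- stated objective: alternative
-- what changed: Replaces itertools.permutations/product/chain with hand-rolled recursion: permutations built by a recursive pick-one 'selections' decomposition, and the Cartesian product built incrementally by folding 'combinations = [prev + perm ...]' over the args instead of product()+flatten.
import Mathlib
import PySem

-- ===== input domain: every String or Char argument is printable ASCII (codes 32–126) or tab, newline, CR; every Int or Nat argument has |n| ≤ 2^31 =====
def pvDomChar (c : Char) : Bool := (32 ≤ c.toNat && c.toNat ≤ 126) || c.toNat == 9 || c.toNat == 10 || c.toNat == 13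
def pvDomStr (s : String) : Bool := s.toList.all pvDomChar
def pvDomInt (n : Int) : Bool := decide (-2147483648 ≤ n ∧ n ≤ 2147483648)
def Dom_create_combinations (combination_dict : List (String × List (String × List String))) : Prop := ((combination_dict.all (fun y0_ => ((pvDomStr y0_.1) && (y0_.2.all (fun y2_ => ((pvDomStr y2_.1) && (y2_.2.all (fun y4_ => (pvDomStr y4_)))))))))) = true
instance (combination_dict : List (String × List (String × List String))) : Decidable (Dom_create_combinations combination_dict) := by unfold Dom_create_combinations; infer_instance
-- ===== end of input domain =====

-- B replaces itertools (permutations + product + chain-flatten) by a recursive selections-based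
-- permutation builder and an incremental fold of the Cartesian product; the equivalence proved is
-- about the RETURN value (both Pythons also perform A's in-place population of empty 'entities').

-- ===== PORT A =====
-- itertools.product(*lists): first factor varies slowest, as in Python.
def pyProductA : List (List (List String)) → List (List (List String))
  | [] => [[]]
  | l :: ls => l.flatMap (fun x => (pyProductA ls).map (fun rest => x :: rest))

def create_combinations (combination_dict : List (String × List (String × List String))) : List (List String) × List String :=
  -- for arg in combination_dict: … (dict iteration in insertion order; Pre_ gives unique keys,
  -- so combination_dict[arg] is this entry's value, read through Dict lookup on the inner dict)
  let st := combination_dict.foldl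
    (fun (st : List (List (List String)) × List String) kv =>
      let arg := kv.1
      let inner := PySem.Dict.mk kv.2
      let ids := inner.getD "ids" []              -- combination_dict[arg]['ids']; missing key (KeyError) excluded by Pre_
      let id_order := st.2 ++ ids
      let entities0 := inner.getD "entities" []   -- combination_dict[arg]['entities']; KeyError excluded by Pre_
      let entities :=
        if entities0 = [] then
          -- id_counter = 1; for _ in ids: entities.append(arg + str(id_counter)); id_counter += 1
          (ids.foldl (fun (p : List String × Int) _ =>
              (p.1 ++ [arg ++ PySem.Int.toStr p.2], p.2 + 1)) ([], 1)).1
        else entities0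
      let permutations := PySem.List.permutations entities ids.length  -- itertools.permutations(entities, len(ids))
      (st.1 ++ [permutations], id_order))
    ([], [])
  let product := pyProductA st.1
  (product.map List.flatten, st.2)               -- list(itertools.chain.from_iterable(x)) = flatten

-- ===== PORT B =====
-- _selections(pool): all (picked element, rest-in-order) pairs, recursively on the head.
def pvSelections : List String → List (String × List String)
  | [] => []
  | head :: tail => (head, tail) :: (pvSelections tail).map (fun p => (p.1, head :: p.2))

-- _permutations(pool, r), recursion on r via _selections.
def pvPerms (pool : List String) : Nat → List (List String)
  | 0 => [[]]
  | r + 1 => (pvSelections pool).flatMap (fun p => (pvPerms p.2 r).map (fun perm => p.1 :: perm))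

def create_combinations_alt (combination_dict : List (String × List (String × List String))) : List (List String) × List String :=
  combination_dict.foldl
    (fun (st : List (List String) × List String) kv =>
      let arg := kv.1
      let inner := PySem.Dict.mk kv.2
      let ids := inner.getD "ids" []              -- KeyError excluded by Pre_
      let entities0 := inner.getD "entities" []   -- KeyError excluded by Pre_
      let entities :=
        if entities0 = [] then
          -- entities.extend(arg + str(i + 1) for i in range(len(ids)))  (extend of the empty list)
          (PySem.List.pyRange 0 ids.length 1).map (fun i => arg ++ PySem.Int.toStr (i + 1))
        else entities0
      let perms := pvPerms entities ids.length
      -- combinations = [prev + perm for prev in combinations for perm in perms]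
      (st.1.flatMap (fun prev => perms.map (fun perm => prev ++ perm)), st.2 ++ ids))
    ([[]], [])

-- ===== PRECONDITION & SPEC =====
-- Pre_ excludes (a) inner dicts missing the key 'ids' or 'entities', where A raises KeyError, and
-- (b) association lists with duplicate outer or inner keys, which have no faithful Python-dict
-- counterpart (the dict literal collapses them, so which value a lookup sees is accidental).
def Pre_create_combinations (combination_dict : List (String × List (String × List String))) : Prop :=
  (combination_dict.map Prod.fst).Nodup ∧
  ∀ kv ∈ combination_dict,
    (kv.2.map Prod.fst).Nodup ∧ "ids" ∈ kv.2.map Prod.fst ∧ "entities" ∈ kv.2.map Prod.fst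
instance (combination_dict : List (String × List (String × List String))) : Decidable (Pre_create_combinations combination_dict) := by unfold Pre_create_combinations; infer_instance

def pvWitness_create_combinations : (List (String × List (String × List String))) :=
  [("table", [("ids", ["i1", "i2"]), ("entities", [])]),
   ("stove", [("ids", ["s1"]), ("entities", ["stove3", "stove7"])])]

def Spec_create_combinations (combination_dict : List (String × List (String × List String))) (out : List (List String) × List String) : Prop := out = create_combinations_alt combination_dict
instance (combination_dict : List (String × List (String × List String))) (out : List (List String) × List String) : Decidable (Spec_create_combinations combination_dict out) := by unfold Spec_create_combinations; infer_instance

-- ===== CLAIM (what is proved, stated in full; the proofs are below) =====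
def Claim_equal_create_combinations : Prop := ∀ (combination_dict : List (String × List (String × List String))), Dom_create_combinations combination_dict → Pre_create_combinations combination_dict → Spec_create_combinations combination_dict (create_combinations combination_dict)

-- ===== LEMMAS AND PROOFS =====

theorem pvSelections_eq (xs : List String) :
    pvSelections xs = (List.range xs.length).map (fun i => (xs.getD i "", xs.eraseIdx i)) := by
  induction xs with
  | nil => simp [pvSelections]
  | cons x xs ih =>
      simp only [pvSelections, List.length_cons, List.range_succ_eq_map, List.map_cons, ih,
        List.map_map]
      refine List.cons_eq_cons.mpr ⟨rfl, ?_⟩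
      exact List.map_congr_left (fun i _ => by simp)

theorem pvPerms_eq (r : Nat) : ∀ pool : List String,
    pvPerms pool r = PySem.List.permutations pool r := by
  induction r with
  | zero => intro pool; rfl
  | succ r ih =>
      intro pool
      show (pvSelections pool).flatMap _ = _
      rw [pvSelections_eq, List.flatMap_map, PySem.List.permutations]
      refine List.flatMap_congr (fun i hi => ?_)
      rw [List.mem_range] at hi
      simp [List.getElem?_eq_getElem hi, ih, List.getD_eq_getElem?_getD]

-- the per-entry data both ports compute
def pvIds (kv : String × List (String × List String)) : List String :=
  (PySem.Dict.mk kv.2).getD "ids" []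

def pvEnt (kv : String × List (String × List String)) : List String :=
  let entities0 := (PySem.Dict.mk kv.2).getD "entities" []
  if entities0 = [] then
    ((pvIds kv).foldl (fun (p : List String × Int) _ =>
        (p.1 ++ [kv.1 ++ PySem.Int.toStr p.2], p.2 + 1)) ([], 1)).1
  else entities0

def pvF (kv : String × List (String × List String)) : List (List String) :=
  PySem.List.permutations (pvEnt kv) (pvIds kv).length

theorem entities_counter_eq (arg : String) (ids : List String) : ∀ (acc : List String) (c : Int),
    (ids.foldl (fun (p : List String × Int) _ =>
        (p.1 ++ [arg ++ PySem.Int.toStr p.2], p.2 + 1)) (acc, c)).1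
      = acc ++ (List.range ids.length).map (fun j : Nat => arg ++ PySem.Int.toStr (c + (j : Int))) := by
  induction ids with
  | nil => intro acc c; simp [List.foldl]
  | cons x xs ih =>
      intro acc c
      simp only [List.foldl_cons, ih, List.length_cons, List.range_succ_eq_map, List.map_cons,
        List.map_map, List.append_assoc, List.singleton_append]
      refine congrArg _ (List.cons_eq_cons.mpr ⟨by simp, ?_⟩)
      exact List.map_congr_left (fun j _ => by
        simp only [Function.comp]
        congr 2
        push_cast
        ring)

-- B's comprehension builds the same entities list as A's counter loop
theorem entities_alt_eq (kv : String × List (String × List String)) :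
    (if (PySem.Dict.mk kv.2).getD "entities" [] = [] then
       (PySem.List.pyRange 0 (pvIds kv).length 1).map (fun i => kv.1 ++ PySem.Int.toStr (i + 1))
     else (PySem.Dict.mk kv.2).getD "entities" []) = pvEnt kv := by
  unfold pvEnt
  by_cases h : (PySem.Dict.mk kv.2).getD "entities" [] = []
  · simp only [h, if_true]
    rw [entities_counter_eq, List.nil_append, PySem.List.pyRange_one]
    simp only [Int.sub_zero, Int.toNat_natCast, List.map_map]
    exact List.map_congr_left (fun j _ => by
      simp only [Function.comp]
      congr 2
      ring)
  · simp only [h, if_false]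

-- appending one factor's permutations into every prefix = extending the product by that factor
theorem product_shift (l : List (List String)) (ls : List (List (List String))) (combos : List (List String)) :
    (combos.flatMap (fun prev => l.map (fun perm => prev ++ perm))).flatMap
        (fun prev => (pyProductA ls).map (fun x => prev ++ x.flatten))
    = combos.flatMap (fun prev => (pyProductA (l :: ls)).map (fun x => prev ++ x.flatten)) := by
  simp only [pyProductA]
  simp [List.flatMap_map, List.flatMap_assoc, List.map_flatMap, List.map_map, Function.comp_def,
    List.flatten_cons, List.append_assoc]

-- A's fold characterised
theorem foldA_eq (cd : List (String × List (String × List String))) :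
    ∀ (cl : List (List (List String))) (io : List String),
    cd.foldl
      (fun (st : List (List (List String)) × List String) kv =>
        let arg := kv.1
        let inner := PySem.Dict.mk kv.2
        let ids := inner.getD "ids" []
        let id_order := st.2 ++ ids
        let entities0 := inner.getD "entities" []
        let entities :=
          if entities0 = [] then
            (ids.foldl (fun (p : List String × Int) _ =>
                (p.1 ++ [arg ++ PySem.Int.toStr p.2], p.2 + 1)) ([], 1)).1
          else entities0
        let permutations := PySem.List.permutations entities ids.length
        (st.1 ++ [permutations], id_order)) (cl, io)
    = (cl ++ cd.map pvF, io ++ cd.flatMap pvIds) := by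
  induction cd with
  | nil => intro cl io; simp
  | cons kv cd ih =>
      intro cl io
      simp only [List.foldl_cons, ih, List.map_cons, List.flatMap_cons]
      simp [pvF, pvEnt, pvIds, List.append_assoc]

-- B's fold characterised
theorem foldB_eq (cd : List (String × List (String × List String))) :
    ∀ (combos : List (List String)) (io : List String),
    cd.foldl
      (fun (st : List (List String) × List String) kv =>
        let arg := kv.1
        let inner := PySem.Dict.mk kv.2
        let ids := inner.getD "ids" []
        let entities0 := inner.getD "entities" []
        let entities :=
          if entities0 = [] then
            (PySem.List.pyRange 0 ids.length 1).map (fun i => arg ++ PySem.Int.toStr (i + 1))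
          else entities0
        let perms := pvPerms entities ids.length
        (st.1.flatMap (fun prev => perms.map (fun perm => prev ++ perm)), st.2 ++ ids))
      (combos, io)
    = (combos.flatMap (fun prev => (pyProductA (cd.map pvF)).map (fun x => prev ++ x.flatten)),
       io ++ cd.flatMap pvIds) := by
  induction cd with
  | nil => intro combos io; simp [pyProductA]
  | cons kv cd ih =>
      intro combos io
      rw [List.foldl_cons]
      show cd.foldl _
        (combos.flatMap (fun prev =>
          (pvPerms (if (PySem.Dict.mk kv.2).getD "entities" [] = [] then
              (PySem.List.pyRange 0 ((PySem.Dict.mk kv.2).getD "ids" []).length 1).map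
                (fun i => kv.1 ++ PySem.Int.toStr (i + 1))
            else (PySem.Dict.mk kv.2).getD "entities" [])
            ((PySem.Dict.mk kv.2).getD "ids" []).length).map (fun perm => prev ++ perm)),
         io ++ (PySem.Dict.mk kv.2).getD "ids" []) = _
      rw [show ((PySem.Dict.mk kv.2).getD "ids" [] : List String) = pvIds kv from rfl,
        entities_alt_eq, pvPerms_eq, ih]
      rw [show PySem.List.permutations (pvEnt kv) (pvIds kv).length = pvF kv from rfl]
      simp only [List.map_cons, List.flatMap_cons, product_shift, List.append_assoc]

-- ===== VERDICT (by name: the statement is the Claim_ definition above) =====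
theorem create_combinations_spec : Claim_equal_create_combinations := by
  intro cd _ _
  unfold Spec_create_combinations create_combinations create_combinations_alt
  rw [foldA_eq, foldB_eq]
  simp
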